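-- pv_equiv track=rewrite | github.com/dmh707/CantStopGame | round.py | filter_combo_through_white_pieces
-- ===== SOURCE A (Python) =====
-- def filter_combo_through_white_pieces(combo,wp_keys):
--     new_combo = combo
--     remove_digits = []
--     for digit in combo:
--         if digit not in wp_keys:
--             remove_digits.append(digit)
--     for digit in remove_digits:
--         new_combo.remove(digit)
--     return new_combo
-- ===== SOURCE B (Python) =====
-- def filter_combo_through_white_pieces(combo, wp_keys):
--     combo[:] = [d for d in combo if d in wp_keys]
--     return combo
-- ===== Notes on version B (the rewrite author's own statement) =====
-- stated objective: simpler
-- what changed: Replaces A's two-phase scheme (accumulate a removal list, then repeatedly list.remove each bad digit with its linear scan) by a single-pass filter comprehension written back via slice assignment, preserving the in-place mutation and aliasing of combo.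
import Mathlib
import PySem

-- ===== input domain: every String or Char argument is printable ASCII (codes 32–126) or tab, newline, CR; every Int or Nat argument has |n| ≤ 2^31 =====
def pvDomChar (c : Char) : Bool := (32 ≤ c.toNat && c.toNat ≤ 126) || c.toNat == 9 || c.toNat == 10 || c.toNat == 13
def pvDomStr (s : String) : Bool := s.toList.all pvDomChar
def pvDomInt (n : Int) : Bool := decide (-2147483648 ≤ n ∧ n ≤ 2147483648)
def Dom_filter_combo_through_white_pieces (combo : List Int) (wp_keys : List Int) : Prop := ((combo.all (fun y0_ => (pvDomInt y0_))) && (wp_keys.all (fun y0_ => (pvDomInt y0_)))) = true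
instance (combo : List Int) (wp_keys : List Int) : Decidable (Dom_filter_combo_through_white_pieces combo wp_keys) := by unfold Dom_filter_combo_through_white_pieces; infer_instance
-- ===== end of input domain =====

-- B replaces A's removal-list + repeated list.remove by a single-pass filter written back in place
-- (simpler); both A and B mutate the argument list in place, the theorem is about the return value.

-- ===== PORT A =====
-- each list.remove succeeds in A (every collected digit is still present with full multiplicity),
-- so the none branch of remove? (Python's ValueError) is unreachable; the proof shows this.
def pvRemoveStep (nc : List Int) (digit : Int) : List Int :=
  match PySem.List.remove? nc digit with
  | some l => l
  | none => nc

def filter_combo_through_white_pieces (combo : List Int) (wp_keys : List Int) : List Int :=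
  let remove_digits :=
    combo.foldl (fun rd digit => if !wp_keys.contains digit then rd ++ [digit] else rd) []
  remove_digits.foldl pvRemoveStep combo

-- ===== PORT B =====
def filter_combo_through_white_pieces_alt (combo : List Int) (wp_keys : List Int) : List Int :=
  combo.filter (fun d => wp_keys.contains d)

-- ===== PRECONDITION & SPEC =====
def Spec_filter_combo_through_white_pieces (combo : List Int) (wp_keys : List Int) (out : List Int) : Prop := out = filter_combo_through_white_pieces_alt combo wp_keys
instance (combo : List Int) (wp_keys : List Int) (out : List Int) : Decidable (Spec_filter_combo_through_white_pieces combo wp_keys out) := by unfold Spec_filter_combo_through_white_pieces; infer_instance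

-- ===== CLAIM (what is proved, stated in full; the proofs are below) =====
def Claim_equal_filter_combo_through_white_pieces : Prop := ∀ (combo : List Int) (wp_keys : List Int), Dom_filter_combo_through_white_pieces combo wp_keys → Spec_filter_combo_through_white_pieces combo wp_keys (filter_combo_through_white_pieces combo wp_keys)

-- ===== LEMMAS AND PROOFS =====

-- the removal-list accumulator is List.filter of the negated membership test
theorem pvRdEq (p : Int → Bool) (combo acc : List Int) :
    combo.foldl (fun rd digit => if !p digit then rd ++ [digit] else rd) acc
      = acc ++ combo.filter (fun d => !p d) := by
  induction combo generalizing acc with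
  | nil => simp
  | cons a l ih =>
    rw [List.foldl_cons]
    by_cases h : p a
    · rw [if_neg (by simp [h]), ih]
      simp [h]
    · rw [if_pos (by simp [h]), ih]
      simp [h]

-- a head not among the digits to remove survives the whole removal fold
theorem pvFoldStep_cons (ds : List Int) (a : Int) (acc : List Int) (h : a ∉ ds) :
    ds.foldl pvRemoveStep (a :: acc) = a :: ds.foldl pvRemoveStep acc := by
  induction ds generalizing acc with
  | nil => rfl
  | cons d ds ih =>
    have hne : a ≠ d := fun he => h (he ▸ List.mem_cons_self)
    have h' : a ∉ ds := fun hm => h (List.mem_cons_of_mem _ hm)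
    have hstep : pvRemoveStep (a :: acc) d = a :: pvRemoveStep acc d := by
      unfold pvRemoveStep
      rw [PySem.List.remove?_cons_of_ne acc hne]
      cases PySem.List.remove? acc d <;> simp
    rw [List.foldl_cons, List.foldl_cons, hstep, ih _ h']

-- removing, in order, every element of l failing p from l leaves exactly the elements passing p
theorem pvMain (p : Int → Bool) (l : List Int) :
    (l.filter (fun d => !p d)).foldl pvRemoveStep l = l.filter p := by
  induction l with
  | nil => rfl
  | cons a l ih =>
    by_cases h : p a
    · have hnm : a ∉ l.filter (fun d => !p d) := by
        intro hm
        have := (List.mem_filter.mp hm).2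
        simp [h] at this
      have hf : List.filter (fun d => !p d) (a :: l) = List.filter (fun d => !p d) l := by
        simp [h]
      rw [hf, pvFoldStep_cons _ _ _ hnm, ih]
      simp [h]
    · have hf : List.filter (fun d => !p d) (a :: l) = a :: List.filter (fun d => !p d) l := by
        simp [h]
      have hs : pvRemoveStep (a :: l) a = l := by
        unfold pvRemoveStep; rw [PySem.List.remove?_cons_self]
      rw [hf, List.foldl_cons, hs, ih]
      simp [h]

-- ===== VERDICT (by name: the statement is the Claim_ definition above) =====
theorem filter_combo_through_white_pieces_spec : Claim_equal_filter_combo_through_white_pieces := by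
  intro combo wp_keys _
  unfold Spec_filter_combo_through_white_pieces filter_combo_through_white_pieces
    filter_combo_through_white_pieces_alt
  simp only [pvRdEq (fun d => wp_keys.contains d) combo [], List.nil_append]
  exact pvMain (fun d => wp_keys.contains d) combo
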